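-- pv_equiv track=rewrite | github.com/uumaaa/Practica-7 | Boundaries/extreme_points.py | findExtremePoints
-- ===== SOURCE A (Python) =====
-- def findExtremePoints(boundary):
--     north_point = None
--     south_point = None
--     east_point = None
--     west_point = None
--
--     for point in boundary:
--         y, x = point
--         if north_point is None or y < north_point[0]:
--             north_point = point
--         if south_point is None or y > south_point[0]:
--             south_point = point
--         if east_point is None or x > east_point[1]:
--             east_point = point
--         if west_point is None or x < west_point[1]:
--             west_point = point
--     return north_point, south_point, east_point, west_point
-- ===== SOURCE B (Python) =====
-- def findExtremePoints(boundary):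
--     pts = list(boundary)
--     if not pts:
--         return (None, None, None, None)
--     north = min(pts, key=lambda p: p[0])
--     south = max(pts, key=lambda p: p[0])
--     east = max(pts, key=lambda p: p[1])
--     west = min(pts, key=lambda p: p[1])
--     return north, south, east, west
-- ===== Notes on version B (the rewrite author's own statement) =====
-- stated objective: idiomatic
-- what changed: Replaces the single hand-rolled accumulator loop carrying four optional candidates with an empty guard plus four built-in min/max calls with key functions (first extremal element matches A's strict-comparison tie-breaking).
import Mathlib
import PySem

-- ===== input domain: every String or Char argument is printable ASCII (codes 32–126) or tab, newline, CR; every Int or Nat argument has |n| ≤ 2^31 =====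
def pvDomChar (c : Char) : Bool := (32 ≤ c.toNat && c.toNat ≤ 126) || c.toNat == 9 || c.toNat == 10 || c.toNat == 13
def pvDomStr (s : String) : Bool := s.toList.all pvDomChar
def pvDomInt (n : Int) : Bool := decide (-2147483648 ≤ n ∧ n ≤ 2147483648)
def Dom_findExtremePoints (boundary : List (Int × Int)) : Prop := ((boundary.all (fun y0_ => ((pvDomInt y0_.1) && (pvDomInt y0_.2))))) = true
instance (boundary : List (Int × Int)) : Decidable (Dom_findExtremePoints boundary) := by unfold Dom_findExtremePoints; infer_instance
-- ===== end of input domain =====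

-- B replaces A's single four-accumulator loop with an empty guard plus four built-in
-- min/max-with-key scans (more idiomatic); same linear cost.

-- ===== PORT A =====
-- one loop iteration of A: the four 'if … is None or <strict cmp>' updates, in order
def pvStepA (st : Option (Int × Int) × Option (Int × Int) × Option (Int × Int) × Option (Int × Int))
    (point : Int × Int) :
    Option (Int × Int) × Option (Int × Int) × Option (Int × Int) × Option (Int × Int) :=
  let n := match st.1 with
    | none => some point
    | some q => if point.1 < q.1 then some point else some q
  let s := match st.2.1 with
    | none => some point
    | some q => if point.1 > q.1 then some point else some q
  let e := match st.2.2.1 with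
    | none => some point
    | some q => if point.2 > q.2 then some point else some q
  let w := match st.2.2.2 with
    | none => some point
    | some q => if point.2 < q.2 then some point else some q
  (n, s, e, w)

def findExtremePoints (boundary : List (Int × Int)) : (Option (Int × Int)) × (Option (Int × Int)) × (Option (Int × Int)) × (Option (Int × Int)) :=
  boundary.foldl pvStepA (none, none, none, none)

-- ===== PORT B =====
def findExtremePoints_alt (boundary : List (Int × Int)) : (Option (Int × Int)) × (Option (Int × Int)) × (Option (Int × Int)) × (Option (Int × Int)) :=
  if boundary = [] then (none, none, none, none)
  else
    (PySem.List.min? boundary (fun p => p.1),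
     PySem.List.max? boundary (fun p => p.1),
     PySem.List.max? boundary (fun p => p.2),
     PySem.List.min? boundary (fun p => p.2))

-- ===== PRECONDITION & SPEC =====
def Spec_findExtremePoints (boundary : List (Int × Int)) (out : (Option (Int × Int)) × (Option (Int × Int)) × (Option (Int × Int)) × (Option (Int × Int))) : Prop := out = findExtremePoints_alt boundary
instance (boundary : List (Int × Int)) (out : (Option (Int × Int)) × (Option (Int × Int)) × (Option (Int × Int)) × (Option (Int × Int))) : Decidable (Spec_findExtremePoints boundary out) := by unfold Spec_findExtremePoints; infer_instance

-- ===== CLAIM (what is proved, stated in full; the proofs are below) =====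
def Claim_equal_findExtremePoints : Prop := ∀ (boundary : List (Int × Int)), Dom_findExtremePoints boundary → Spec_findExtremePoints boundary (findExtremePoints boundary)

-- ===== LEMMAS AND PROOFS =====

-- proof helpers: one step of a min/max-with-key running fold
def pvMinStep (key : Int × Int → Int) (acc : Option (Int × Int)) (x : Int × Int) : Option (Int × Int) :=
  match acc with
  | none => some x
  | some m => if key x < key m then some x else some m

def pvMaxStep (key : Int × Int → Int) (acc : Option (Int × Int)) (x : Int × Int) : Option (Int × Int) :=
  match acc with
  | none => some x
  | some m => if key m < key x then some x else some m

theorem pv_min?_eq_fold (key : Int × Int → Int) (xs : List (Int × Int)) :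
    PySem.List.min? xs key = List.foldl (pvMinStep key) none xs := by
  unfold PySem.List.min?
  apply List.foldl_ext
  intro acc x _
  cases acc <;> rfl

theorem pv_max?_eq_fold (key : Int × Int → Int) (xs : List (Int × Int)) :
    PySem.List.max? xs key = List.foldl (pvMaxStep key) none xs := by
  unfold PySem.List.max?
  apply List.foldl_ext
  intro acc x _
  cases acc <;> rfl

-- A's combined fold splits into four independent option-accumulator folds
theorem pv_fold_split (xs : List (Int × Int)) (n s e w : Option (Int × Int)) :
    xs.foldl pvStepA (n, s, e, w) =
      (xs.foldl (pvMinStep (fun p => p.1)) n,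
       xs.foldl (pvMaxStep (fun p => p.1)) s,
       xs.foldl (pvMaxStep (fun p => p.2)) e,
       xs.foldl (pvMinStep (fun p => p.2)) w) := by
  induction xs generalizing n s e w with
  | nil => rfl
  | cons p t ih =>
    simp only [List.foldl_cons]
    rw [show pvStepA (n, s, e, w) p =
        (pvMinStep (fun q => q.1) n p, pvMaxStep (fun q => q.1) s p,
         pvMaxStep (fun q => q.2) e p, pvMinStep (fun q => q.2) w p) from by
      cases n <;> cases s <;> cases e <;> cases w <;> rfl]
    exact ih _ _ _ _

-- ===== VERDICT (by name: the statement is the Claim_ definition above) =====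
theorem findExtremePoints_spec : Claim_equal_findExtremePoints := by
  intro boundary _
  show findExtremePoints boundary = findExtremePoints_alt boundary
  unfold findExtremePoints findExtremePoints_alt
  rw [pv_fold_split, pv_min?_eq_fold, pv_min?_eq_fold, pv_max?_eq_fold, pv_max?_eq_fold]
  rcases boundary with _ | ⟨p, t⟩
  · rfl
  · simp only [if_neg (List.cons_ne_nil p t)]
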